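-- pv_equiv track=rewrite | github.com/ZhexuanLei/DataStructure_Algorithm | Week4/OJ/LatestRequestCounts.py | func
-- ===== SOURCE A (Python) =====
-- def func(mylist):
--     output = []
--     lst = []
--     for i in mylist:
--         lst.append(i)
--         while i - lst[0] > 10000:
--             lst.pop(0)
--         output.append(len(lst))
--     for i in range(len(mylist)):
--         for j in range(i+1,len(mylist)):
--             if mylist[j] == mylist[i]:
--                 output[i] += 1
--
--     return output
-- ===== SOURCE B (Python) =====
-- def func(mylist):
--     n = len(mylist)
--     win = []
--     start = 0
--     for k, v in enumerate(mylist):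
--         while v - mylist[start] > 10000:
--             start += 1
--         win.append(k - start + 1)
--     seen = {}
--     dups = [0] * n
--     for i in range(n - 1, -1, -1):
--         v = mylist[i]
--         c = seen.get(v, 0)
--         dups[i] = c
--         seen[v] = c + 1
--     return [w + d for w, d in zip(win, dups)]
-- ===== Notes on version B (the rewrite author's own statement) =====
-- stated objective: faster
-- what changed: Replaced A's pop-from-front window list (O(n) per pop) and its quadratic nested duplicate double-scan by a two-pointer sliding-window index over the input plus one reverse pass maintaining a dict of suffix occurrence counts.
import Mathlib
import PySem

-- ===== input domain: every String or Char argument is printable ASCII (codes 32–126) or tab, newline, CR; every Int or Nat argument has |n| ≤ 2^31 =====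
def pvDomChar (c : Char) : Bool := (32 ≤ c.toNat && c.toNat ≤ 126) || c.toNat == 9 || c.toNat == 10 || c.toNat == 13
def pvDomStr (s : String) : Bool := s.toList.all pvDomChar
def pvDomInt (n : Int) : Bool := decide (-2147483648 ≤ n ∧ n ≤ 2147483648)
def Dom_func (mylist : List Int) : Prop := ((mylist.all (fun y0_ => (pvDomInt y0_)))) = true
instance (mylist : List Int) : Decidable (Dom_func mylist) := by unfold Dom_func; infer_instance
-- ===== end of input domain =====

-- B replaces A's quadratic pop-from-the-front window list and quadratic duplicate
-- double-scan by a two-pointer window over indices plus a single reverse pass with a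
-- dict of suffix occurrence counts (objective: faster, asymptotic).

-- ===== PORT A =====
-- the 'while i - lst[0] > 10000: lst.pop(0)' loop (lst is never empty there in A)
def popA (i : Int) : List Int → List Int
  | [] => []
  | x :: rest => if i - x > 10000 then popA i rest else x :: rest

def func (mylist : List Int) : List Int :=
  let first := (mylist.foldl (fun (p : List Int × List Int) i =>
      let lst := popA i (p.2 ++ [i])
      (p.1 ++ [(lst.length : Int)], lst)) ([], [])).1
  -- second pass: for i in range(n): for j in range(i+1, n): if mylist[j] == mylist[i]: output[i] += 1
  (List.range mylist.length).foldl (fun out i =>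
     (List.range' (i+1) (mylist.length - (i+1))).foldl (fun out2 j =>
        if mylist[j]! = mylist[i]! then out2.modify i (· + 1) else out2) out) first

-- ===== PORT B =====
-- B's 'while v - mylist[start] > 10000: start += 1' (the bounds check only makes it total;
-- B's invariant start ≤ k keeps it in range)
def advB (mylist : List Int) (v : Int) (start : Nat) : Nat :=
  if h : start < mylist.length then
    if v - mylist[start] > 10000 then advB mylist v (start + 1) else start
  else start
termination_by mylist.length - start

-- B's reverse loop: returns (seen, dups) after processing a suffix right-to-left
def dupPass : List Int → PySem.Dict Int Int × List Int
  | [] => (PySem.Dict.empty, [])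
  | v :: rest =>
    let p := dupPass rest
    let c := p.1.getD v 0
    (p.1.insert v (c + 1), c :: p.2)

def func_alt (mylist : List Int) : List Int :=
  let win := ((PySem.List.enumerate mylist 0).foldl
      (fun (p : Nat × List Int) kv =>
        let start := advB mylist kv.2 p.1
        (start, p.2 ++ [kv.1 - (start : Int) + 1])) (0, [])).2
  let dups := (dupPass mylist).2
  List.zipWith (fun w d => w + d) win dups

-- ===== PRECONDITION & SPEC =====
def Spec_func (mylist : List Int) (out : List Int) : Prop := out = func_alt mylist
instance (mylist : List Int) (out : List Int) : Decidable (Spec_func mylist out) := by unfold Spec_func; infer_instance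

-- ===== CLAIM (what is proved, stated in full; the proofs are below) =====
def Claim_equal_func : Prop := ∀ (mylist : List Int), Dom_func mylist → Spec_func mylist (func mylist)

-- ===== LEMMAS AND PROOFS =====

-- first-pass window equivalence -------------------------------------------------

/-- A's pop loop on a window slice agrees with B's index advance. -/
theorem popA_adv (L : List Int) (k : Nat) (hk : k < L.length) :
    ∀ fuel s, s ≤ k → k - s ≤ fuel →
      popA L[k] ((L.take (k+1)).drop s) = (L.take (k+1)).drop (advB L L[k] s) ∧
      advB L L[k] s ≤ k := by
  intro fuel
  induction fuel with
  | zero =>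
    intro s hs hf
    have hsk : s = k := by omega
    have hlt : s < L.length := by omega
    have hslen : s < (L.take (k+1)).length := by simp; omega
    have hdrop := List.drop_eq_getElem_cons hslen
    rw [List.getElem_take] at hdrop
    have h2 : L[s]? = L[k]? := by rw [hsk]
    rw [List.getElem?_eq_getElem hlt, List.getElem?_eq_getElem hk] at h2
    have hval : L[s] = L[k] := Option.some.inj h2
    have hcond : ¬ (L[k] - L[s] > 10000) := by rw [hval]; omega
    rw [advB, hdrop]
    simp [popA, hlt, hcond, ← hdrop]
    omega
  | succ fuel ih =>
    intro s hs hf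
    have hlt : s < L.length := by omega
    have hslen : s < (L.take (k+1)).length := by simp; omega
    have hdrop := List.drop_eq_getElem_cons hslen
    rw [List.getElem_take] at hdrop
    rw [advB, hdrop]
    by_cases hcond : L[k] - L[s] > 10000
    · have hsk : s ≠ k := by
        intro he
        have h2 : L[s]? = L[k]? := by rw [he]
        rw [List.getElem?_eq_getElem hlt, List.getElem?_eq_getElem hk] at h2
        have := Option.some.inj h2
        omega
      have := ih (s+1) (by omega) (by omega)
      simp only [popA, if_pos hcond, dif_pos hlt]
      exact ⟨this.1, this.2⟩
    · simp [popA, hlt, hcond, ← hdrop]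
      omega

/-- main first-pass fold invariant -/
theorem pass1 (L : List Int) :
    ∀ (rest pre : List Int) (outAcc : List Int) (start : Nat),
      L = pre ++ rest → start ≤ pre.length →
      (rest.foldl (fun (p : List Int × List Int) i =>
          let lst := popA i (p.2 ++ [i])
          (p.1 ++ [(lst.length : Int)], lst)) (outAcc, (L.take pre.length).drop start)).1
      = ((PySem.List.enumerate rest (pre.length : Int)).foldl
          (fun (p : Nat × List Int) kv =>
            let start := advB L kv.2 p.1
            (start, p.2 ++ [kv.1 - (start : Int) + 1])) (start, outAcc)).2 := by
  intro rest
  induction rest with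
  | nil =>
    intro pre outAcc start h1 h2
    simp [PySem.List.enumerate]
  | cons i rest' ih =>
    intro pre outAcc start hL hstart
    have hk : pre.length < L.length := by subst hL; simp
    have hik : i = L[pre.length] := by
      subst hL
      rw [List.getElem_append_right (le_refl _)]
      simp
    have hcat : (L.take pre.length).drop start ++ [i] = (L.take (pre.length+1)).drop start := by
      rw [List.take_add_one, List.getElem?_eq_getElem hk,
          List.drop_append_of_le_length (by simp; omega)]
      simp [hik]
    have hadv := popA_adv L pre.length hk pre.length start hstart (by omega)
    rw [List.foldl_cons, PySem.List.enumerate_cons, List.foldl_cons]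
    dsimp only
    rw [hcat, hik, hadv.1]
    have hs' : advB L L[pre.length] start ≤ pre.length := hadv.2
    have hlen : (((L.take (pre.length+1)).drop (advB L L[pre.length] start)).length : Int)
        = (pre.length : Int) - (advB L L[pre.length] start : Int) + 1 := by
      simp; omega
    rw [hlen]
    have := ih (pre ++ [i]) (outAcc ++ [(pre.length : Int) - (advB L L[pre.length] start : Int) + 1])
        (advB L L[pre.length] start) (by rw [hL]; simp) (by simp; omega)
    simp only [List.length_append, List.length_cons, List.length_nil] at this
    convert this using 3

-- second-pass equivalence --------------------------------------------------------

theorem modify_modify {α : Type} (f g : α → α) (i : Nat) (l : List α) :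
    (l.modify i f).modify i g = l.modify i (fun x => g (f x)) := by
  apply List.ext_getElem?
  intro j
  simp [List.getElem?_modify]
  cases l[j]? with
  | none => rfl
  | some a => by_cases h : i = j <;> simp [h]

/-- inner j-loop adds countP to slot i -/
theorem inner_fold (P : Nat → Prop) [DecidablePred P] (i : Nat) :
    ∀ (J : List Nat) (out : List Int),
      J.foldl (fun out2 j => if P j then out2.modify i (· + 1) else out2) out
      = out.modify i (· + (J.countP (fun j => decide (P j)))) := by
  intro J
  induction J with
  | nil =>
    intro out
    simp only [List.foldl_nil, List.countP_nil]
    apply List.ext_getElem?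
    intro j
    simp [List.getElem?_modify]
  | cons j J' ih =>
    intro out
    rw [List.foldl_cons, List.countP_cons]
    by_cases h : P j
    · rw [if_pos h, ih, modify_modify, if_pos (by simpa using h)]
      congr 1
      funext x
      push_cast
      ring
    · rw [if_neg h, ih, if_neg (by simpa using h)]
      simp

/-- countP over index range = count over the suffix -/
theorem count_range' (L : List Int) (v : Int) :
    ∀ fuel s, s ≤ L.length → L.length - s ≤ fuel →
      ((List.range' s (L.length - s)).countP (fun j => decide (L[j]! = v)) : Int)
      = (L.drop s).count v := by
  intro fuel
  induction fuel with
  | zero =>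
    intro s hs hf
    have : L.length - s = 0 := by omega
    rw [this]
    simp [List.drop_eq_nil_of_le (by omega : L.length ≤ s)]
  | succ fuel ih =>
    intro s hs hf
    rcases Nat.eq_or_lt_of_le hs with h | h
    · have h0 : L.length - s = 0 := by omega
      rw [h0]
      simp [List.drop_eq_nil_of_le (by omega : L.length ≤ s)]
    · have h1 : L.length - s = (L.length - (s+1)) + 1 := by omega
      rw [h1, List.range'_succ, List.drop_eq_getElem_cons h, List.countP_cons, List.count_cons]
      have := ih (s+1) (by omega) (by omega)
      rw [getElem!_pos L s h]
      push_cast [← this]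
      by_cases he : L[s] = v <;> simp [he]

/-- outer i-loop: pointwise characterization -/
theorem outer_fold (C : Nat → Int) :
    ∀ (m s : Nat) (out : List Int) (j : Nat),
      ((List.range' s m).foldl (fun o i => o.modify i (fun x => x + C i)) out)[j]?
      = if s ≤ j ∧ j < s + m then out[j]?.map (· + C j) else out[j]? := by
  intro m
  induction m with
  | zero =>
    intro s out j
    simp
  | succ m ih =>
    intro s out j
    rw [List.range'_succ, List.foldl_cons, ih, List.getElem?_modify]
    cases hoj : out[j]? with
    | none => simp
    | some a =>
      by_cases h1 : s = j
      · subst h1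
        have hB : s < s + (m+1) := by omega
        simp [hB]
      · simp only [Option.map_some, if_neg h1]
        split_ifs <;> simp <;> omega

-- dup counts ---------------------------------------------------------------------

theorem dupPass_getD (xs : List Int) : ∀ v, (dupPass xs).1.getD v 0 = (xs.count v : Int) := by
  induction xs with
  | nil => intro v; simp [dupPass, PySem.Dict.getD, PySem.Dict.get?, PySem.Dict.empty]
  | cons x rest ih =>
    intro v
    simp only [dupPass, PySem.Dict.getD_insert, List.count_cons, ih]
    by_cases h : v = x
    · simp [h]
    · simp [h]
      omega

theorem dupPass_length (xs : List Int) : (dupPass xs).2.length = xs.length := by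
  induction xs with
  | nil => rfl
  | cons x rest ih => simp [dupPass, ih]

theorem dupPass_getElem? (xs : List Int) (i : Nat) (h : i < xs.length) :
    (dupPass xs).2[i]? = some ((xs.drop (i+1)).count xs[i]!) := by
  induction xs generalizing i with
  | nil => simp at h
  | cons x rest ih =>
    cases i with
    | zero => simp [dupPass, dupPass_getD, getElem!_pos]
    | succ i =>
      simp only [dupPass, List.getElem?_cons_succ, List.drop_succ_cons]
      have := ih i (by simpa using h)
      simpa [getElem!_pos, List.getElem_cons_succ] using this

-- assembly ------------------------------------------------------------------------

theorem win_length (L : List Int) :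
    ∀ (xs : List Int) (s0 : Int) (st : Nat) (acc : List Int),
      ((PySem.List.enumerate xs s0).foldl
        (fun (p : Nat × List Int) kv =>
          let start := advB L kv.2 p.1
          (start, p.2 ++ [kv.1 - (start : Int) + 1])) (st, acc)).2.length
      = acc.length + xs.length := by
  intro xs
  induction xs with
  | nil => intro s0 st acc; simp [PySem.List.enumerate]
  | cons x xs ih =>
    intro s0 st acc
    rw [PySem.List.enumerate_cons, List.foldl_cons]
    dsimp only
    rw [ih]
    simp
    omega

theorem func_eq_alt (L : List Int) : func L = func_alt L := by
  simp only [func, func_alt]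
  have h0 := pass1 L L [] [] 0 (by simp) (by simp)
  simp only [List.length_nil, List.take_zero, List.drop_zero, Nat.cast_zero] at h0
  rw [h0]
  rw [List.range_eq_range']
  have hfunext : (fun (out : List Int) (i : Nat) =>
      (List.range' (i+1) (L.length - (i+1))).foldl (fun out2 j =>
        if L[j]! = L[i]! then out2.modify i (· + 1) else out2) out)
      = (fun (out : List Int) (i : Nat) => out.modify i
          (fun x => x + ((List.range' (i+1) (L.length - (i+1))).countP
            (fun j => decide (L[j]! = L[i]!)) : Int))) := by
    funext out i
    exact inner_fold (fun j => L[j]! = L[i]!) i _ out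
  rw [hfunext]
  apply List.ext_getElem?
  intro j
  rw [outer_fold]
  have hwl : (((PySem.List.enumerate L 0).foldl
      (fun (p : Nat × List Int) kv =>
        let start := advB L kv.2 p.1
        (start, p.2 ++ [kv.1 - (start : Int) + 1])) (0, [])).2).length = L.length := by
    rw [win_length]; simp
  rw [List.getElem?_zipWith]
  by_cases hj : j < L.length
  · have hcond : 0 ≤ j ∧ j < 0 + L.length := by omega
    rw [if_pos hcond]
    rw [List.getElem?_eq_getElem (lt_of_lt_of_eq hj hwl.symm), dupPass_getElem? L j hj]
    have hC := count_range' L L[j]! L.length (j+1) (by omega) (by omega)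
    simp only [Option.map_some]
    rw [hC]
    rfl
  · have hcond : ¬ (0 ≤ j ∧ j < 0 + L.length) := by omega
    rw [if_neg hcond]
    rw [List.getElem?_eq_none (hwl.trans_le (by omega)),
        List.getElem?_eq_none ((dupPass_length L).trans_le (by omega))]

-- ===== VERDICT (by name: the statement is the Claim_ definition above) =====
theorem func_spec : Claim_equal_func := by
  intro mylist _
  unfold Spec_func
  exact func_eq_alt mylist
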